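-- pv_equiv track=rewrite | github.com/youngjaekwon/Algorithm | 프로그래머스/lv0/120884. 치킨 쿠폰/치킨 쿠폰.py | solution
-- ===== SOURCE A (Python) =====
-- def solution(chicken):
--     coupon = 0
--     answer = 0
--     while chicken:
--         coupon += chicken % 10
--         chicken //= 10
--         answer += chicken
--
--     coupon_ = 0
--     while coupon:
--         coupon_ += coupon % 10
--         coupon //= 10
--         answer += coupon
--     return answer + coupon_ // 10
-- ===== SOURCE B (Python) =====
-- def solution(chicken):
--     # Direct simulation: 10 coupons -> 1 free chicken, which yields another coupon.
--     answer = 0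
--     coupon = chicken
--     while coupon >= 10:
--         answer += coupon // 10
--         coupon = coupon // 10 + coupon % 10
--     return answer
-- ===== Notes on version B (the rewrite author's own statement) =====
-- stated objective: simpler
-- what changed: Replaces the two digit-sum/quotient-accumulation passes plus a final correction term with a direct one-loop simulation of the coupon exchange (answer += coupon//10; coupon = coupon//10 + coupon%10).
-- outside the precondition, e.g. on solution(-5): A does not finish within the time limit, B returns 0
import Mathlib
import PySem

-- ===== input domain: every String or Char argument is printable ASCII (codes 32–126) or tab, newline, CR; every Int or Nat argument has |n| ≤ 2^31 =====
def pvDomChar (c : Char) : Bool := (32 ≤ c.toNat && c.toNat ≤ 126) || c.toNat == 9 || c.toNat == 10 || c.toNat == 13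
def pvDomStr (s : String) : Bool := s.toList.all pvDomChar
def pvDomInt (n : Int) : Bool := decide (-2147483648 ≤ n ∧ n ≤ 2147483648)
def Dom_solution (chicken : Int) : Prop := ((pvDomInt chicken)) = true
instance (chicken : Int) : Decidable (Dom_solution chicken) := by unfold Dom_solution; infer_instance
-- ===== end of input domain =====

-- B replaces A's two digit-sum/quotient passes with a direct one-loop coupon-exchange simulation (objective: simpler).


-- ===== PORT A =====
-- A's while-loop 'while x: s += x % 10; x //= 10; answer += x' (run once on chicken, once on coupon).
-- For nonnegative x, Python's % and // agree with Nat's, so the loop state lives in Nat.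
def digLoop (n : Nat) (c : Nat) (a : Nat) : Nat × Nat :=
  if h : n = 0 then (c, a)
  else digLoop (n / 10) (c + n % 10) (a + n / 10)
termination_by n
decreasing_by exact Nat.div_lt_self (Nat.pos_of_ne_zero h) (by omega)

-- Python A diverges on negative chicken (chicken //= 10 converges to -1 and stays); those inputs are
-- outside Pre_solution, and the 'else 0' branch is only a totality guard, never reached under Pre_.
def solution (chicken : Int) : Int :=
  if 0 ≤ chicken then
    let p := digLoop chicken.toNat 0 0          -- (coupon, answer) after the first while
    let q := digLoop p.1 0 p.2                  -- (coupon_, answer) after the second while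
    ((q.2 + q.1 / 10 : Nat) : Int)              -- answer + coupon_ // 10
  else 0

-- ===== PORT B =====
-- Source B's loop: while coupon >= 10: answer += coupon // 10; coupon = coupon // 10 + coupon % 10
def simLoop (c : Nat) (a : Nat) : Nat :=
  if h : 10 ≤ c then simLoop (c / 10 + c % 10) (a + c / 10) else a
termination_by c
decreasing_by
  have h2 : 1 ≤ c / 10 := Nat.one_le_div_iff (by omega) |>.mpr h
  omega

-- For negative chicken B's while-guard fails immediately and it returns answer = 0 = simLoop 0 0.
def solution_alt (chicken : Int) : Int := (simLoop chicken.toNat 0 : Nat)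

-- ===== PRECONDITION & SPEC =====
-- Pre_ excludes negative chicken, where Python A loops forever (chicken //= 10 sticks at -1).
def Pre_solution (chicken : Int) : Prop := 0 ≤ chicken
instance (chicken : Int) : Decidable (Pre_solution chicken) := by unfold Pre_solution; infer_instance
def pvWitness_solution : Int := (100)
def Spec_solution (chicken : Int) (out : Int) : Prop := out = solution_alt chicken
instance (chicken : Int) (out : Int) : Decidable (Spec_solution chicken out) := by unfold Spec_solution; infer_instance

-- ===== CLAIM (what is proved, stated in full; the proofs are below) =====
def Claim_equal_solution : Prop := ∀ (chicken : Int), Dom_solution chicken → Pre_solution chicken → Spec_solution chicken (solution chicken)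

-- ===== LEMMAS AND PROOFS =====

-- digit sum of n
def dS (n : Nat) : Nat :=
  if h : n = 0 then 0 else dS (n / 10) + n % 10
termination_by n
decreasing_by exact Nat.div_lt_self (Nat.pos_of_ne_zero h) (by omega)

-- sum of the successive quotients n/10, n/100, …
def dT (n : Nat) : Nat :=
  if h : n = 0 then 0 else n / 10 + dT (n / 10)
termination_by n
decreasing_by exact Nat.div_lt_self (Nat.pos_of_ne_zero h) (by omega)

theorem digLoop_eq (n c a : Nat) : digLoop n c a = (c + dS n, a + dT n) := by
  induction n using Nat.strong_induction_on generalizing c a with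
  | _ n ih =>
    rw [digLoop, dS, dT]
    by_cases h : n = 0
    · simp [h]
    · simp only [dif_neg h]
      rw [ih (n / 10) (Nat.div_lt_self (Nat.pos_of_ne_zero h) (by omega))]
      exact Prod.ext (by omega) (by omega)

theorem dS_add_nine_dT (n : Nat) : dS n + 9 * dT n = n := by
  induction n using Nat.strong_induction_on with
  | _ n ih =>
    rw [dS, dT]
    by_cases h : n = 0
    · simp [h]
    · simp only [dif_neg h]
      have := ih (n / 10) (Nat.div_lt_self (Nat.pos_of_ne_zero h) (by omega))
      omega

theorem dS_pos (n : Nat) (h : 0 < n) : 0 < dS n := by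
  induction n using Nat.strong_induction_on with
  | _ n ih =>
    rw [dS]
    rw [dif_neg (Nat.pos_iff_ne_zero.mp h)]
    by_cases hr : n % 10 = 0
    · have hd : 0 < n / 10 := by omega
      have := ih (n / 10) (Nat.div_lt_self h (by omega)) hd
      omega
    · omega

theorem dS_le (k n : Nat) (h : n < 10 ^ k) : dS n ≤ 9 * k := by
  induction k generalizing n with
  | zero => interval_cases n; simp [dS]
  | succ k ih =>
    rw [dS]
    by_cases h0 : n = 0
    · simp [h0]
    · simp only [dif_neg h0]
      have hlt : n / 10 < 10 ^ k := by
        rw [Nat.div_lt_iff_lt_mul (by omega)]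
        calc n < 10 ^ (k + 1) := h
        _ = 10 ^ k * 10 := by ring
      have := ih (n / 10) hlt
      omega

theorem simLoop_eq (c a : Nat) : simLoop c a = a + (c - 1) / 9 := by
  induction c using Nat.strong_induction_on generalizing a with
  | _ c ih =>
    rw [simLoop]
    by_cases h : 10 ≤ c
    · simp only [h, dif_pos]
      have h1 := Nat.div_add_mod c 10
      have h2 : 1 ≤ c / 10 := Nat.one_le_div_iff (by omega) |>.mpr h
      rw [ih (c / 10 + c % 10) (by omega)]
      have h3 : c % 10 < 10 := Nat.mod_lt _ (by omega)
      omega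
    · simp only [h, dif_neg, not_false_iff]
      omega

-- ===== VERDICT (by name: the statement is the Claim_ definition above) =====
theorem solution_spec : Claim_equal_solution := by
  intro chicken hdom hpre
  obtain ⟨n, rfl⟩ : ∃ m : Nat, chicken = (m : Int) :=
    ⟨chicken.toNat, (Int.toNat_of_nonneg hpre).symm⟩
  unfold Spec_solution solution solution_alt
  rw [if_pos (by exact_mod_cast Int.natCast_nonneg n)]
  have hnle : n ≤ 2147483648 := by
    unfold Dom_solution pvDomInt at hdom
    simp at hdom
    exact_mod_cast hdom
  simp only [Int.toNat_natCast]
  rw [digLoop_eq, digLoop_eq, simLoop_eq]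
  simp only [Nat.zero_add]
  have h1 := dS_add_nine_dT n
  have h2 := dS_add_nine_dT (dS n)
  by_cases h0 : n = 0
  · subst h0; simp [dS, dT]
  · have hs : 0 < dS n := dS_pos n (by omega)
    have hu : 0 < dS (dS n) := dS_pos _ hs
    have hsle : dS n ≤ 90 := dS_le 10 n (by omega)
    have hule : dS (dS n) ≤ 18 := dS_le 2 (dS n) (by omega)
    have key : (dT n + dT (dS n)) + dS (dS n) / 10 = (n - 1) / 9 := by omega
    push_cast
    omega
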